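-- pv_equiv track=rewrite | github.com/Aasthaengg/IBMdataset | Python_codes/p02271/s729572989.py | can_be_composed
-- ===== SOURCE A (Python) =====
-- import itertools
--
-- def can_be_composed(n, min_list, max_list, m, A):
-- 	for i in range(1, n + 1):
-- 		if m < min_list[i - 1]:
-- 			continue
-- 		if m > max_list[i - 1]:
-- 			continue
--
-- 		combination_list = list(itertools.combinations(A, i))
-- 		for l in combination_list:
-- 			if m == sum(l):
-- 				return True
--
-- 	return False
-- ===== SOURCE B (Python) =====
-- def can_be_composed(n, min_list, max_list, m, A):
--     # For each admissible subset size, decide reachability of m by a subset-sum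
--     # dynamic program over deduplicated (size, sum) pairs capped at that size,
--     # exiting as soon as (i, m) is reached, instead of enumerating combinations.
--     for i in range(1, n + 1):
--         if min_list[i - 1] <= m <= max_list[i - 1]:
--             reach = {(0, 0)}
--             for a in A:
--                 reach.update({(k + 1, s + a) for (k, s) in reach if k < i})
--                 if (i, m) in reach:
--                     return True
--     return False
-- ===== Notes on version B (the rewrite author's own statement) =====
-- stated objective: alternative
-- what changed: Instead of materializing all itertools.combinations of each admissible size, B decides each admissible size by a subset-sum dynamic program over deduplicated (size, sum) pairs capped at that size, with an early exit once (size, m) becomes reachable.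
-- outside the precondition, e.g. on can_be_composed(2, [1], [1], 1, [1]): A returns True, B returns True
import Mathlib
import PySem

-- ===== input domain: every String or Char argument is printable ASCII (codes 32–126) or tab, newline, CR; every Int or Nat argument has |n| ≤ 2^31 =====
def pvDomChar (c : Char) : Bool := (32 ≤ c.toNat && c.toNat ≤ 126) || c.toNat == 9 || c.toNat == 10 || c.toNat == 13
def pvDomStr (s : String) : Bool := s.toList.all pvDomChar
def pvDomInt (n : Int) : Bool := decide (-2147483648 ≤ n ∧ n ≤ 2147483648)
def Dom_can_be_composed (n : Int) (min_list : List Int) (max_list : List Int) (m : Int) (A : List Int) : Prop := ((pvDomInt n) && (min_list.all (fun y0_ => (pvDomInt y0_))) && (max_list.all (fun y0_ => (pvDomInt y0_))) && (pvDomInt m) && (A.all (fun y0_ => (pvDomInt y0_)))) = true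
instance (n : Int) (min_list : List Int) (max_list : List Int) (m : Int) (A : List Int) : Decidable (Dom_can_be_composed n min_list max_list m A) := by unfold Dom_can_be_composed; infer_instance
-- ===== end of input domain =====

-- B decides each admissible size by a subset-sum DP over deduplicated (size, sum) pairs
-- capped at that size, with early exit, instead of enumerating combinations; objective: alternative.

-- ===== PORT A =====
-- itertools.combinations(A, k), transliterated (lexicographic by index)
def combos : List Int → Nat → List (List Int)
  | _, 0 => [[]]
  | [], _ + 1 => []
  | x :: xs, k + 1 => (combos xs k).map (fun l => x :: l) ++ combos xs (k + 1)

def can_be_composed (n : Int) (min_list : List Int) (max_list : List Int) (m : Int) (A : List Int) : Bool :=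
  (PySem.List.pyRange 1 (n + 1) 1).any (fun i =>
    match PySem.List.pyGet? min_list (i - 1), PySem.List.pyGet? max_list (i - 1) with
    | some lo, some hi =>
      if m < lo then false
      else if hi < m then false
      else (combos A i.toNat).any (fun l => m == l.sum)
    | _, _ => false)   -- pyGet? = none is an IndexError in Python; excluded by Pre_

-- ===== PORT B =====
-- reach.update({(k+1, s+a) for (k, s) in reach if k < cap})
def altStep (cap : Int) (reach : List (Int × Int)) (a : Int) : List (Int × Int) :=
  PySem.Set.update reach
    (PySem.Set.ofList ((reach.filter (fun p => decide (p.1 < cap))).map (fun p => (p.1 + 1, p.2 + a))))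

-- the inner 'for a in A' loop for one size i, with the early 'return True'
def altLoop (m : Int) (i : Int) (reach : List (Int × Int)) : List Int → Bool
  | [] => false
  | a :: rest =>
    if PySem.Set.contains (altStep i reach a) (i, m) then true
    else altLoop m i (altStep i reach a) rest

def can_be_composed_alt (n : Int) (min_list : List Int) (max_list : List Int) (m : Int) (A : List Int) : Bool :=
  (PySem.List.pyRange 1 (n + 1) 1).any (fun i =>
    (PySem.List.pyGet? min_list (i - 1)).elim false (fun lo =>
      (PySem.List.pyGet? max_list (i - 1)).elim false (fun hi =>
        decide (lo ≤ m) && decide (m ≤ hi) && altLoop m i [(0, 0)] A)))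
    -- pyGet? = none is an IndexError in Python; excluded by Pre_

-- ===== PRECONDITION & SPEC =====
-- Pre_ excludes inputs where min_list or max_list is shorter than n: there A raises
-- IndexError unless an earlier iteration happens to return True first.
def Pre_can_be_composed (n : Int) (min_list : List Int) (max_list : List Int) (m : Int) (A : List Int) : Prop :=
  n ≤ (min_list.length : Int) ∧ n ≤ (max_list.length : Int)
instance (n : Int) (min_list : List Int) (max_list : List Int) (m : Int) (A : List Int) : Decidable (Pre_can_be_composed n min_list max_list m A) := by unfold Pre_can_be_composed; infer_instance

def pvWitness_can_be_composed : Int × List Int × List Int × Int × List Int := (2, [0, 0], [5, 5], 3, [1, 2])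

def Spec_can_be_composed (n : Int) (min_list : List Int) (max_list : List Int) (m : Int) (A : List Int) (out : Bool) : Prop := out = can_be_composed_alt n min_list max_list m A
instance (n : Int) (min_list : List Int) (max_list : List Int) (m : Int) (A : List Int) (out : Bool) : Decidable (Spec_can_be_composed n min_list max_list m A out) := by unfold Spec_can_be_composed; infer_instance

-- ===== CLAIM (what is proved, stated in full; the proofs are below) =====
def Claim_equal_can_be_composed : Prop := ∀ (n : Int) (min_list : List Int) (max_list : List Int) (m : Int) (A : List Int), Dom_can_be_composed n min_list max_list m A → Pre_can_be_composed n min_list max_list m A → Spec_can_be_composed n min_list max_list m A (can_be_composed n min_list max_list m A)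

-- ===== LEMMAS AND PROOFS =====

theorem mem_altStep (cap : Int) (r : List (Int × Int)) (a : Int) (q : Int × Int) :
    q ∈ altStep cap r a ↔ q ∈ r ∨ ∃ p ∈ r, p.1 < cap ∧ q = (p.1 + 1, p.2 + a) := by
  simp only [altStep, PySem.Set.mem_update, PySem.Set.mem_ofList, List.mem_map, List.mem_filter,
    decide_eq_true_eq]
  constructor
  · rintro (h | ⟨p, ⟨hp, hlt⟩, rfl⟩)
    · exact Or.inl h
    · exact Or.inr ⟨p, hp, hlt, rfl⟩
  · rintro (h | ⟨p, hp, hlt, rfl⟩)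
    · exact Or.inl h
    · exact Or.inr ⟨p, ⟨hp, hlt⟩, rfl⟩

theorem mem_foldl_altStep (cap : Int) :
    ∀ (A : List Int) (r : List (Int × Int)) (k s : Int),
      (k, s) ∈ A.foldl (altStep cap) r ↔
        ((k, s) ∈ r ∨ ∃ j : Nat, ∃ l ∈ combos A (j + 1), ∃ p ∈ r,
            k = p.1 + (j + 1) ∧ s = p.2 + l.sum ∧ k ≤ cap) := by
  intro A
  induction A with
  | nil =>
    intro r k s
    simp [combos]
  | cons a A ih =>
    intro r k s
    simp only [List.foldl_cons]
    rw [ih]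
    constructor
    · rintro (h | ⟨j, l, hl, p', hp', hk, hs, hle⟩)
      · rw [mem_altStep] at h
        rcases h with h | ⟨p, hp, hlt, heq⟩
        · exact Or.inl h
        · -- new pair from the step: corresponds to the singleton combo [a]
          refine Or.inr ⟨0, [a], ?_, p, hp, ?_, ?_, ?_⟩
          · simp [combos]
          · simpa using congrArg Prod.fst heq
          · have := congrArg Prod.snd heq; simp at this; simp [this]
          · have := congrArg Prod.fst heq; simp at this; omega
      · rw [mem_altStep] at hp'
        rcases hp' with hp' | ⟨p, hp, hlt, rfl⟩
        · -- combo not using a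
          refine Or.inr ⟨j, l, ?_, p', hp', hk, hs, hle⟩
          simp [combos, hl]
        · -- combo using a in front
          refine Or.inr ⟨j + 1, a :: l, ?_, p, hp, by simp at hk ⊢; omega, ?_, hle⟩
          · simp only [combos, List.mem_append, List.mem_map]
            exact Or.inl ⟨l, hl, rfl⟩
          · simp at hs ⊢; omega
    · rintro (h | ⟨j, l, hl, p, hp, hk, hs, hle⟩)
      · left; rw [mem_altStep]; exact Or.inl h
      · simp only [combos, List.mem_append, List.mem_map] at hl
        rcases hl with ⟨l₀, hl₀, rfl⟩ | hl
        · cases j with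
          | zero =>
            -- l = [a], realized directly by the step
            simp only [combos, List.mem_singleton] at hl₀
            subst hl₀
            left
            rw [mem_altStep]
            exact Or.inr ⟨p, hp, by omega, by simp at hs ⊢; omega⟩
          | succ j' =>
            refine Or.inr ⟨j', l₀, hl₀, (p.1 + 1, p.2 + a), ?_, by omega, by simp at hs ⊢; omega, hle⟩
            rw [mem_altStep]
            exact Or.inr ⟨p, hp, by omega, rfl⟩
        · refine Or.inr ⟨j, l, hl, p, ?_, hk, hs, hle⟩
          rw [mem_altStep]
          exact Or.inl hp

theorem subset_foldl_altStep (cap : Int) :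
    ∀ (A : List Int) (r : List (Int × Int)) (q : Int × Int), q ∈ r → q ∈ A.foldl (altStep cap) r := by
  intro A
  induction A with
  | nil => intro r q h; simpa using h
  | cons a A ih =>
    intro r q h
    exact ih _ q ((mem_altStep cap r a q).mpr (Or.inl h))

theorem altLoop_eq (m i : Int) :
    ∀ (A : List Int) (r : List (Int × Int)), (i, m) ∉ r →
      (altLoop m i r A = true ↔ (i, m) ∈ A.foldl (altStep i) r) := by
  intro A
  induction A with
  | nil => intro r hr; simp [altLoop, hr]
  | cons a A ih =>
    intro r hr
    by_cases hc : (i, m) ∈ altStep i r a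
    · simp only [altLoop, (PySem.Set.contains_iff _ _).mpr hc, if_true, List.foldl_cons]
      exact iff_of_true trivial (subset_foldl_altStep i A _ _ hc)
    · have hcb : PySem.Set.contains (altStep i r a) (i, m) = false := by
        rw [Bool.eq_false_iff]
        intro h
        exact hc ((PySem.Set.contains_iff _ _).mp h)
      simp only [altLoop, hcb, Bool.false_eq_true, if_false, List.foldl_cons]
      exact ih _ hc

theorem reach_iff (m : Int) (A : List Int) (i : Int) (h1 : 1 ≤ i) :
    ((i, m) ∈ A.foldl (altStep i) [(0, 0)] ↔ ∃ l ∈ combos A i.toNat, m = l.sum) := by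
  rw [mem_foldl_altStep]
  constructor
  · rintro (h | ⟨j, l, hl, p, hp, hk, hs, _⟩)
    · simp at h; omega
    · simp only [List.mem_singleton] at hp
      subst hp
      simp only at hk hs
      refine ⟨l, ?_, by omega⟩
      have hij : i.toNat = j + 1 := by omega
      rw [hij]; exact hl
  · rintro ⟨l, hl, hm⟩
    obtain ⟨j, hj⟩ : ∃ j : Nat, i.toNat = j + 1 := ⟨i.toNat - 1, by omega⟩
    exact Or.inr ⟨j, l, by rw [← hj]; exact hl, (0, 0), by simp, by simp; omega,
      by simpa using hm, le_refl i⟩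

-- ===== VERDICT (by name: the statement is the Claim_ definition above) =====
theorem can_be_composed_spec : Claim_equal_can_be_composed := by
  intro n min_list max_list m A _ hpre
  unfold Spec_can_be_composed can_be_composed can_be_composed_alt
  apply PySem.List.any_congr_mem
  intro i hi
  rw [PySem.List.mem_pyRange_one] at hi
  obtain ⟨hmin, hmax⟩ := hpre
  rcases PySem.List.pyGet? min_list (i - 1) with _ | lo
  · rfl
  rcases PySem.List.pyGet? max_list (i - 1) with _ | hi2
  · rfl
  simp only [Option.elim]
  by_cases h1 : m < lo
  · simp [h1, not_le.mpr h1]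
  · by_cases h2 : hi2 < m
    · simp [h1, h2, not_le.mpr h2]
    · simp only [if_neg h1, if_neg h2, decide_eq_true (not_lt.mp h1), decide_eq_true (not_lt.mp h2),
        Bool.true_and]
      rw [Bool.eq_iff_iff, List.any_eq_true]
      rw [altLoop_eq m i A [(0, 0)] (by simp; omega)]
      rw [reach_iff m A i (by omega)]
      simp
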